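-- pv_equiv track=rewrite | github.com/maru395/freeCodeCampDaily2026 | feb/day14.py | get_difficulty
-- ===== SOURCE A (Python) =====
-- def get_difficulty(track):
--     score = 0
--     temp = track[0]
--     for i in track:
--         if i == "S":
--             score += 0
--             temp = i
--         elif i != temp and temp != "S":
--             score += 15
--             temp = i
--         else:
--             score += 5
--             temp = i
--     return score
-- ===== SOURCE B (Python) =====
-- def get_difficulty(track):
--     # Staged algorithm: split the track into maximal segments of consecutive
--     # non-"S" elements, then score each segment from its statistics:
--     # 5 per element plus 10 per run boundary inside the segment.
--     segs, cur = [], []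
--     for x in track:
--         if x == "S":
--             if cur:
--                 segs.append(cur)
--                 cur = []
--         else:
--             cur.append(x)
--     if cur:
--         segs.append(cur)
--     return sum(5 * len(s) + 10 * (_runs(s) - 1) for s in segs)
--
--
-- def _runs(s):
--     # number of maximal runs of equal consecutive elements
--     runs, last = 0, None
--     for x in s:
--         if x != last:  # None never equals a string
--             runs += 1
--         last = x
--     return runs
-- ===== Notes on version B (the rewrite author's own statement) =====
-- stated objective: alternative
-- what changed: Replaces A's single-pass loop that scores each element against a running previous-element variable with a staged computation: split the track into maximal segments of consecutive non-'S' elements, count maximal equal-element runs per segment, and score each segment arithmetically as 5*length + 10*(runs-1).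
import Mathlib
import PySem

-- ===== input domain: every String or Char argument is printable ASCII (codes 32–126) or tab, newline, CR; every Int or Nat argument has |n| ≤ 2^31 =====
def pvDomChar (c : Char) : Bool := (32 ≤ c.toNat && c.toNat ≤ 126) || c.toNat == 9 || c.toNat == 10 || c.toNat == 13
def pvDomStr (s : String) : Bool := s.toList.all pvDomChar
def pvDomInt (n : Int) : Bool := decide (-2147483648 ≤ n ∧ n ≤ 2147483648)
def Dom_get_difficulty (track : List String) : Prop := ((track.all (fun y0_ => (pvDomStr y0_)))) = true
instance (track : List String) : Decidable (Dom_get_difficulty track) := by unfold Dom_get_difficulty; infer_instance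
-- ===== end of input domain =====

-- B replaces A's single-pass transition-scoring loop by a staged computation
-- (split into non-"S" segments, then 5*length + 10*(runs-1) per segment); same cost, alternative algorithm.

-- ===== PORT A =====
-- A: fold carrying (score, temp); temp initialised from track[0] (Pre_ excludes []).
def get_difficulty (track : List String) : Int :=
  (track.foldl
    (fun (st : Int × String) i =>
      if i = "S" then (st.1 + 0, i)
      else if i ≠ st.2 ∧ st.2 ≠ "S" then (st.1 + 15, i)
      else (st.1 + 5, i))
    (0, track.headD "")).1

-- ===== PORT B =====
-- B, stage 1: accumulate maximal segments of consecutive non-"S" elements (Python's segs/cur loop).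
def pvSegStep (st : List (List String) × List String) (x : String) : List (List String) × List String :=
  if x = "S" then (if st.2 = [] then st else (st.1 ++ [st.2], []))
  else (st.1, st.2 ++ [x])

def pvSegments (track : List String) : List (List String) :=
  let st := track.foldl pvSegStep ([], [])
  if st.2 = [] then st.1 else st.1 ++ [st.2]

-- B's _runs: count of maximal runs of equal consecutive elements (loop with `last : Option`).
def pvRuns (s : List String) : Int :=
  (s.foldl (fun (st : Int × Option String) x =>
      (if some x ≠ st.2 then st.1 + 1 else st.1, some x)) (0, none)).1

def pvSegScore (s : List String) : Int := 5 * (s.length : Int) + 10 * (pvRuns s - 1)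

def get_difficulty_alt (track : List String) : Int :=
  ((pvSegments track).map pvSegScore).sum

-- ===== PRECONDITION & SPEC =====
-- Pre_ excludes only the empty list, on which A raises IndexError (track[0]); B returns 0 there.
def Pre_get_difficulty (track : List String) : Prop := track ≠ []
instance (track : List String) : Decidable (Pre_get_difficulty track) := by unfold Pre_get_difficulty; infer_instance
def pvWitness_get_difficulty : List String := (["S", "a", "b"])
def Spec_get_difficulty (track : List String) (out : Int) : Prop := out = get_difficulty_alt track
instance (track : List String) (out : Int) : Decidable (Spec_get_difficulty track out) := by unfold Spec_get_difficulty; infer_instance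


-- ===== CLAIM (what is proved, stated in full; the proofs are below) =====
def Claim_equal_get_difficulty : Prop := ∀ (track : List String), Dom_get_difficulty track → Pre_get_difficulty track → Spec_get_difficulty track (get_difficulty track)

-- ===== LEMMAS AND PROOFS =====

-- Per-element cost of A's loop as a recursion consuming the list with the running temp.
def pvCost : String → List String → Int
  | _, [] => 0
  | t, x :: xs =>
      (if x = "S" then 0 else if x ≠ t ∧ t ≠ "S" then 15 else 5) + pvCost x xs

theorem pv_fold_cost (xs : List String) : ∀ (s : Int) (t : String),
    (xs.foldl
      (fun (st : Int × String) i =>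
        if i = "S" then (st.1 + 0, i)
        else if i ≠ st.2 ∧ st.2 ≠ "S" then (st.1 + 15, i)
        else (st.1 + 5, i))
      (s, t)).1 = s + pvCost t xs := by
  induction xs with
  | nil => intro s t; simp [pvCost]
  | cons x xs ih =>
    intro s t
    simp only [List.foldl_cons]
    split_ifs with h1 h2
    · rw [ih]; simp [pvCost, h1]
    · rw [ih]; simp [pvCost, h1, h2]; ring
    · rw [ih]; simp [pvCost, h1, h2]; ring

-- Recursive characterisation of stage 1 (what the segs/cur fold computes).
def pvSegsAux : List String → List String → List (List String)
  | cur, [] => if cur = [] then [] else [cur]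
  | cur, x :: xs =>
      if x = "S" then (if cur = [] then pvSegsAux [] xs else cur :: pvSegsAux [] xs)
      else pvSegsAux (cur ++ [x]) xs

theorem pv_foldseg (xs : List String) : ∀ (segs : List (List String)) (cur : List String),
    (let st := xs.foldl pvSegStep (segs, cur);
     if st.2 = [] then st.1 else st.1 ++ [st.2]) = segs ++ pvSegsAux cur xs := by
  induction xs with
  | nil =>
    intro segs cur
    by_cases h : cur = [] <;> simp [pvSegsAux, h]
  | cons x xs ih =>
    intro segs cur
    simp only [List.foldl_cons, pvSegStep, pvSegsAux]
    by_cases hx : x = "S"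
    · by_cases hc : cur = [] <;> simp [hx, hc, ih]
    · simp [hx, ih]

theorem pv_segments_eq (xs : List String) : pvSegments xs = pvSegsAux [] xs := by
  have := pv_foldseg xs [] []
  simpa [pvSegments] using this

-- The second component of the runs fold is the last element seen.
theorem pv_runs_snd (s : List String) : ∀ (c : Int) (o : Option String),
    (s.foldl (fun (st : Int × Option String) x =>
        (if some x ≠ st.2 then st.1 + 1 else st.1, some x)) (c, o)).2
      = (match s.getLast? with | some t => some t | none => o) := by
  induction s with
  | nil => intro c o; simp
  | cons x xs ih =>
    intro c o
    simp only [List.foldl_cons]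
    rw [ih]
    cases hx : xs.getLast? with
    | some t => simp [List.getLast?_cons, hx]
    | none =>
      have : xs = [] := by
        cases xs with
        | nil => rfl
        | cons y ys => simp [List.getLast?_cons] at hx
      simp [this]

theorem pv_runs_append (cur : List String) (t x : String) (h : cur.getLast? = some t) :
    pvRuns (cur ++ [x]) = pvRuns cur + (if x = t then 0 else 1) := by
  unfold pvRuns
  rw [List.foldl_append]
  simp only [List.foldl_cons, List.foldl_nil]
  rw [pv_runs_snd, h]
  by_cases hx : x = t <;> simp [hx]

theorem pv_runs_singleton (x : String) : pvRuns [x] = 1 := by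
  simp [pvRuns]

-- Sum of segment scores with a pending segment cur.
def pvG (cur xs : List String) : Int := ((pvSegsAux cur xs).map pvSegScore).sum

theorem pv_main : ∀ (n : ℕ) (xs : List String), xs.length ≤ n →
    (pvCost "S" xs = pvG [] xs) ∧
    (∀ (t : String) (cur : List String), cur ≠ [] → cur.getLast? = some t → t ≠ "S" →
       pvCost t xs + 5 * (cur.length : Int) + 10 * (pvRuns cur - 1) = pvG cur xs) := by
  intro n
  induction n with
  | zero =>
    intro xs hx
    have hxs : xs = [] := by cases xs <;> simp_all
    subst hxs
    refine ⟨by simp [pvCost, pvG, pvSegsAux], ?_⟩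
    intro t cur hc hl ht
    simp [pvCost, pvG, pvSegsAux, hc, pvSegScore]
  | succ n ih =>
    intro xs hx
    cases xs with
    | nil =>
      refine ⟨by simp [pvCost, pvG, pvSegsAux], ?_⟩
      intro t cur hc hl ht
      simp [pvCost, pvG, pvSegsAux, hc, pvSegScore]
    | cons x r =>
      have hr : r.length ≤ n := by simpa using Nat.lt_succ_iff.mp (by simpa using hx)
      obtain ⟨ihA, ihB⟩ := ih r hr
      constructor
      · -- pvCost "S" (x::r) = pvG [] (x::r)
        by_cases hx1 : x = "S"
        · simp [pvCost, hx1, pvG, pvSegsAux, ihA]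
        · have hb := ihB x [x] (by simp) (by simp) hx1
          simp only [pvCost, hx1, if_neg, if_false]
          have : (if x ≠ "S" ∧ ("S" : String) ≠ "S" then (15:Int) else 5) = 5 := by simp
          rw [this]
          have hG : pvG [] (x :: r) = pvG [x] r := by
            simp [pvG, pvSegsAux, hx1]
          rw [hG, ← hb, pv_runs_singleton]
          simp
          ring
      · intro t cur hc hl ht
        by_cases hx1 : x = "S"
        · have hG : pvG cur (x :: r) = pvSegScore cur + pvG [] r := by
            simp [pvG, pvSegsAux, hx1, hc]
          have : pvCost t (x :: r) = pvCost "S" r := by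
            simp [pvCost, hx1]
          rw [this, hG, ← ihA, pvSegScore]
          ring
        · have hG : pvG cur (x :: r) = pvG (cur ++ [x]) r := by
            simp [pvG, pvSegsAux, hx1]
          have hlast : (cur ++ [x]).getLast? = some x := by simp
          have hb := ihB x (cur ++ [x]) (by simp) hlast hx1
          rw [hG, ← hb, pv_runs_append cur t x hl]
          have hcost : pvCost t (x :: r) = (if x = t then (5:Int) else 15) + pvCost x r := by
            by_cases hxt : x = t
            · simp [pvCost, hxt, ht]
            · simp [pvCost, hx1, hxt, ht]
          rw [hcost]
          by_cases hxt : x = t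
          · simp only [hxt, if_pos, ht, ite_true, ite_false, if_neg, not_false_iff]
            simp [ht]
            push_cast
            ring
          · simp only [if_neg hxt]
            simp [hxt]
            push_cast
            ring

theorem pv_cost_head (x : String) (r : List String) :
    pvCost x (x :: r) = pvCost "S" (x :: r) := by
  by_cases hx : x = "S"
  · subst hx; rfl
  · simp [pvCost, hx]

-- ===== VERDICT (by name: the statement is the Claim_ definition above) =====
theorem get_difficulty_spec : Claim_equal_get_difficulty := by
  intro track _ hpre
  unfold Spec_get_difficulty get_difficulty get_difficulty_alt
  cases track with
  | nil => exact absurd rfl hpre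
  | cons x r =>
    rw [pv_fold_cost]
    have hmain := (pv_main (x :: r).length (x :: r) le_rfl).1
    simp only [List.headD_cons, zero_add]
    rw [pv_cost_head, hmain, pv_segments_eq]
    rfl
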